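-- pv_equiv track=rewrite | github.com/viktor-nikolaus/advent-of-code | 2024/day_21.py | split_sequence_and_count
-- ===== SOURCE A (Python) =====
-- def split_sequence_and_count(input_sequence):
--     sequence_groups = {}
--     for s in input_sequence.split("A")[0:-1]:
--         s += "A"
--         if s not in sequence_groups:
--             sequence_groups[s] = 0
--         sequence_groups[s] += 1
--     return sequence_groups
-- ===== SOURCE B (Python) =====
-- def split_sequence_and_count(input_sequence):
--     counts = {}
--     buf = []
--     for ch in input_sequence:
--         buf.append(ch)
--         if ch == "A":
--             seg = "".join(buf)
--             counts[seg] = counts.get(seg, 0) + 1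
--             buf = []
--     return counts
-- ===== Notes on version B (the rewrite author's own statement) =====
-- stated objective: alternative
-- what changed: Replaces split('A')[0:-1] plus a membership-guarded tally with a single character scan that keeps a current-segment buffer and bumps the segment's count each time an 'A' closes it, discarding the unterminated tail implicitly.
import Mathlib
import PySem

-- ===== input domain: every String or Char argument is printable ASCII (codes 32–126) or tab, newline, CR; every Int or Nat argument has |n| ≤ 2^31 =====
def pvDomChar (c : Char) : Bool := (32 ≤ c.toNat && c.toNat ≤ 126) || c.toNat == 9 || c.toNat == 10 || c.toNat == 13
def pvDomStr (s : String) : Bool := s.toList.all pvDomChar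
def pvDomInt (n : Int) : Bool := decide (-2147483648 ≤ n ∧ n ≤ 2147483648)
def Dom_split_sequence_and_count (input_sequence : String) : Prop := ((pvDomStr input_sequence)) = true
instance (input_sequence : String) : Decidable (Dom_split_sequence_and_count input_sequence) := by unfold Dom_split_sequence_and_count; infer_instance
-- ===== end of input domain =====

-- B replaces split('A')[0:-1] + a dict tally with a single char scan keeping a segment buffer (alternative decomposition, same cost).

-- ===== PORT A =====
-- for s in input_sequence.split("A")[0:-1]: s += "A"; if s not in d: d[s] = 0; d[s] += 1
def split_sequence_and_count (input_sequence : String) : List (String × Int) :=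
  (((PySem.List.slice (PySem.Chars.splitOn input_sequence.toList ['A']) (some 0) (some (-1))).foldl
      (fun (d : PySem.Dict String Int) cs =>
        let s := String.ofList (cs ++ ['A'])
        let d := if d.contains s then d else d.insert s 0
        d.modify s 0 (· + 1))
      PySem.Dict.empty)).items

-- ===== PORT B =====
-- single pass: append each char to a buffer; on 'A' bump the buffer's count and reset it
def split_sequence_and_count_alt (input_sequence : String) : List (String × Int) :=
  ((input_sequence.toList.foldl
      (fun (st : PySem.Dict String Int × List Char) ch =>
        let buf := st.2 ++ [ch]
        if ch = 'A' then
          let seg := String.ofList buf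
          (st.1.insert seg (st.1.getD seg 0 + 1), [])
        else (st.1, buf))
      (PySem.Dict.empty, [])).1).items

-- ===== PRECONDITION & SPEC =====
def Spec_split_sequence_and_count (input_sequence : String) (out : List (String × Int)) : Prop := out = split_sequence_and_count_alt input_sequence
instance (input_sequence : String) (out : List (String × Int)) : Decidable (Spec_split_sequence_and_count input_sequence out) := by unfold Spec_split_sequence_and_count; infer_instance

-- ===== CLAIM (what is proved, stated in full; the proofs are below) =====
def Claim_equal_split_sequence_and_count : Prop := ∀ (input_sequence : String), Dom_split_sequence_and_count input_sequence → Spec_split_sequence_and_count input_sequence (split_sequence_and_count input_sequence)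

-- ===== LEMMAS AND PROOFS =====

-- reference recursion for splitting on the single character 'A'
def splitA : List Char → List (List Char)
  | [] => [[]]
  | c :: t => if c = 'A' then [] :: splitA t else
      match splitA t with
      | [] => [[c]]
      | h :: r => (c :: h) :: r

-- prepend a prefix to the head piece
def consH (p : List Char) : List (List Char) → List (List Char)
  | [] => [p]
  | h :: r => (p ++ h) :: r

theorem splitA_ne_nil (l : List Char) : splitA l ≠ [] := by
  cases l with
  | nil => simp [splitA]
  | cons c t =>
    simp only [splitA]
    split
    · simp
    · split <;> simp

theorem consH_consH (p q : List Char) (X : List (List Char)) :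
    consH p (consH q X) = consH (p ++ q) X := by
  cases X <;> simp [consH]

theorem splitA_cons_ne (c : Char) (t : List Char) (hc : c ≠ 'A') :
    splitA (c :: t) = consH [c] (splitA t) := by
  cases hE : splitA t with
  | nil => exact absurd hE (splitA_ne_nil t)
  | cons h r => simp [splitA, if_neg hc, hE, consH]

theorem splitA_singleton (l : List Char) (h : 'A' ∉ l) : splitA l = [l] := by
  induction l with
  | nil => rfl
  | cons c t ih =>
    have hc : c ≠ 'A' := fun hce => h (hce ▸ List.mem_cons_self)
    rw [splitA_cons_ne c t hc, ih (fun ht => h (List.mem_cons_of_mem c ht))]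
    rfl

theorem splitA_append (p l : List Char) (hp : 'A' ∉ p) :
    splitA (p ++ l) = consH p (splitA l) := by
  induction p with
  | nil =>
    cases hE : splitA l with
    | nil => exact absurd hE (splitA_ne_nil l)
    | cons h r => simp [consH, hE]
  | cons c p' ih =>
    have hc : c ≠ 'A' := fun hce => hp (hce ▸ List.mem_cons_self)
    have hp' : 'A' ∉ p' := fun ht => hp (List.mem_cons_of_mem c ht)
    rw [List.cons_append, splitA_cons_ne c _ hc, ih hp', consH_consH]
    rfl

theorem go_spec (fuel : Nat) (l cur : List Char) (acc : List (List Char))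
    (hf : l.length < fuel) :
    PySem.Chars.splitOn.go ['A'] fuel l cur acc
      = acc.reverse ++ consH cur.reverse (splitA l) := by
  induction fuel generalizing l cur acc with
  | zero => omega
  | succ n ih =>
    cases l with
    | nil =>
      simp [PySem.Chars.splitOn.go, splitA, consH]
    | cons c rest =>
      by_cases hc : c = 'A'
      · subst hc
        have hpre : (['A'] : List Char).isPrefixOf ('A' :: rest) = true := by
          simp [List.isPrefixOf]
        rw [show PySem.Chars.splitOn.go ['A'] (n+1) ('A' :: rest) cur acc
              = PySem.Chars.splitOn.go ['A'] n (List.drop (['A'] : List Char).length ('A' :: rest)) [] (cur.reverse :: acc) by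
            simp [PySem.Chars.splitOn.go, hpre]]
        have hrest : rest.length < n := by simpa using Nat.lt_of_succ_lt_succ hf
        rw [ih _ _ _ (by simpa using hrest)]
        cases hE : splitA rest with
        | nil => exact absurd hE (splitA_ne_nil rest)
        | cons h r => simp [splitA, consH, hE]
      · have hpre : (['A'] : List Char).isPrefixOf (c :: rest) = false := by
          simp [List.isPrefixOf]
          exact fun h => absurd h.symm hc
        rw [show PySem.Chars.splitOn.go ['A'] (n+1) (c :: rest) cur acc
              = PySem.Chars.splitOn.go ['A'] n rest (c :: cur) acc by
            simp [PySem.Chars.splitOn.go, hpre]]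
        have hrest : rest.length < n := Nat.lt_of_succ_lt_succ hf
        rw [ih _ _ _ hrest, splitA_cons_ne c rest hc, consH_consH, List.reverse_cons]

theorem splitOn_eq_splitA (l : List Char) : PySem.Chars.splitOn l ['A'] = splitA l := by
  rw [show PySem.Chars.splitOn l ['A'] = PySem.Chars.splitOn.go ['A'] (l.length + 1) l [] [] from rfl,
      go_spec _ _ _ _ (Nat.lt_succ_self _)]
  cases hE : splitA l with
  | nil => exact absurd hE (splitA_ne_nil l)
  | cons h r => simp [consH]

-- A's guarded tally step equals B's get-then-insert step
theorem stepA_eq (d : PySem.Dict String Int) (k : String) :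
    (if d.contains k then d else d.insert k 0).modify k 0 (· + 1)
      = d.insert k (d.getD k 0 + 1) := by
  by_cases h : d.contains k = true
  · simp [h, PySem.Dict.modify]
  · have h' : d.contains k = false := by simpa using h
    simp [PySem.Dict.modify, h, PySem.Dict.getD_insert_self,
      PySem.Dict.getD_of_not_contains d 0 h', PySem.Dict.insert_insert_self]

-- the scan invariant: buffer holds the current (A-free) partial segment
theorem scan_invariant (l : List Char) (d : PySem.Dict String Int) (buf : List Char)
    (hbuf : 'A' ∉ buf) :
    (l.foldl
      (fun (st : PySem.Dict String Int × List Char) ch =>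
        let b := st.2 ++ [ch]
        if ch = 'A' then
          let seg := String.ofList b
          (st.1.insert seg (st.1.getD seg 0 + 1), [])
        else (st.1, b))
      (d, buf)).1
      = (splitA (buf ++ l)).dropLast.foldl
          (fun (d : PySem.Dict String Int) cs =>
            d.insert (String.ofList (cs ++ ['A'])) (d.getD (String.ofList (cs ++ ['A'])) 0 + 1)) d := by
  induction l generalizing d buf with
  | nil =>
    rw [List.append_nil, splitA_singleton buf hbuf]
    simp
  | cons c t ih =>
    by_cases hc : c = 'A'
    · subst hc
      rw [splitA_append buf ('A' :: t) hbuf,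
        show splitA ('A' :: t) = [] :: splitA t by simp [splitA]]
      simp only [consH, List.append_nil]
      rw [List.dropLast_cons_of_ne_nil (splitA_ne_nil t)]
      simp only [List.foldl_cons]
      exact (ih _ [] (by simp)).trans (by rw [List.nil_append])
    · rw [List.foldl_cons]
      simp only [if_neg hc]
      rw [ih _ (buf ++ [c]) (by simp [hbuf]; exact fun h => hc h.symm)]
      rw [List.append_assoc]
      rfl

-- ===== VERDICT (by name: the statement is the Claim_ definition above) =====
theorem split_sequence_and_count_spec : Claim_equal_split_sequence_and_count := by
  intro s _
  unfold Spec_split_sequence_and_count split_sequence_and_count split_sequence_and_count_alt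
  rw [splitOn_eq_splitA]
  rw [show PySem.List.slice (splitA s.toList) (some 0) (some (-1)) = (splitA s.toList).dropLast by
    simp [pysem, List.dropLast_eq_take]]
  rw [scan_invariant s.toList PySem.Dict.empty [] (by simp), List.nil_append]
  rw [List.foldl_ext _ _ _ (fun a b _ => stepA_eq a (String.ofList (b ++ ['A'])))]
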